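-- pv_equiv track=rewrite | github.com/Halion1/MSAlgorithm | scripts/NEEDLEMAN/dna.py | get_consensus_dna
-- ===== SOURCE A (Python) =====
-- def get_consensus_dna(aligned_sequences):
--     consensus = []
--
--     # Iterate over each column in the alignment
--     for col in zip(*aligned_sequences):
--         # Count each nucleotide in the column
--         nucleotide_counts = {'A': 0, 'T': 0, 'C': 0, 'G': 0}
--         for nucleotide in col:
--             if nucleotide in nucleotide_counts:
--                 nucleotide_counts[nucleotide] += 1
--
--         # Find the nucleotide with the highest count for this column
--         most_common_nucleotide = max(nucleotide_counts, key=nucleotide_counts.get)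
--
--         # If two nucleotides have the same count, we append 'N'
--         max_count = nucleotide_counts[most_common_nucleotide]
--         if list(nucleotide_counts.values()).count(max_count) > 1:
--             consensus.append('N')
--         else:
--             consensus.append(most_common_nucleotide)
--
--     return ''.join(consensus)
-- ===== SOURCE B (Python) =====
-- def get_consensus_dna(aligned_sequences):
--     out = []
--     for col in zip(*aligned_sequences):
--         # sort the column's nucleotides, then scan equal-runs instead of counting
--         bases = sorted(ch for ch in col if ch in 'ACGT')
--         runs = []
--         for ch in bases:
--             if runs and runs[-1][0] == ch:
--                 runs[-1] = (ch, runs[-1][1] + 1)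
--             else:
--                 runs.append((ch, 1))
--         longest = [r for r in runs if all(r[1] >= s[1] for s in runs)]
--         out.append(longest[0][0] if len(longest) == 1 else 'N')
--     return ''.join(out)
-- ===== Notes on version B (the rewrite author's own statement) =====
-- stated objective: alternative
-- what changed: Per column B sorts the nucleotides and scans equal-runs to find a unique longest run, instead of A's fixed {'A','T','C','G'} counting dict with argmax and a values().count tie test.
import Mathlib
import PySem

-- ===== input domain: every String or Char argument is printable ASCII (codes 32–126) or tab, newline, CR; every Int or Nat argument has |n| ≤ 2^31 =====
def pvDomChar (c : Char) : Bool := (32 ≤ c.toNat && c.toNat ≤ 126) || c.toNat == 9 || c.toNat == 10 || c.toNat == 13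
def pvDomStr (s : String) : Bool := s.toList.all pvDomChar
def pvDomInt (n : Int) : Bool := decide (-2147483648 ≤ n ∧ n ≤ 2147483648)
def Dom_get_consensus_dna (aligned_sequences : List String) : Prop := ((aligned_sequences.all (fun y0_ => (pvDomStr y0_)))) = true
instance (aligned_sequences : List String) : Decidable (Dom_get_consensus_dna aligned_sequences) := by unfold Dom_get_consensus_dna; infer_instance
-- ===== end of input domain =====

-- B replaces A's per-column {'A','T','C','G'} counting dict + argmax + values().count tie test
-- by sorting each column's nucleotides and scanning equal-runs for a unique longest run;
-- objective: alternative algorithm, same result.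
-- The fixed-key dict of A is rendered as a 4-tuple of Ints in insertion order (A,T,C,G); exact,
-- since the key set never changes.

-- ===== PORT A =====

-- A's inner loop body: "if nucleotide in nucleotide_counts: nucleotide_counts[nucleotide] += 1"
def pvStep (cnt : Int × Int × Int × Int) (ch : Char) : Int × Int × Int × Int :=
  let (a, t, c, g) := cnt
  if ch = 'A' then (a + 1, t, c, g)
  else if ch = 'T' then (a, t + 1, c, g)
  else if ch = 'C' then (a, t, c + 1, g)
  else if ch = 'G' then (a, t, c, g + 1)
  else (a, t, c, g)

-- dict lookup nucleotide_counts[k] (k is always one of the four keys)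
def pvGet (cnt : Int × Int × Int × Int) (k : Char) : Int :=
  let (a, t, c, g) := cnt
  if k = 'A' then a else if k = 'T' then t else if k = 'C' then c else g

-- the per-column decision of A: max(dict, key=get) scan (first key wins ties),
-- then the values().count(max_count) > 1 tie test
def pvPickA (cnt : Int × Int × Int × Int) : Char :=
  let (a, t, c, g) := cnt
  let k2 := if t > a then 'T' else 'A'
  let v2 := if t > a then t else a
  let k3 := if c > v2 then 'C' else k2
  let v3 := if c > v2 then c else v2
  let k4 := if g > v3 then 'G' else k3
  let maxCount := pvGet cnt k4
  if 1 < ([a, t, c, g].count maxCount) then 'N' else k4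

-- zip(*aligned_sequences): stop as soon as any sequence is exhausted (shared by both Pythons)
def pvZipStar : List (List Char) → List (List Char)
  | [] => []
  | r :: rs =>
    if h : (r :: rs).all (fun x => !x.isEmpty) then
      ((r :: rs).map (fun x => x.headD ' ')) :: pvZipStar ((r :: rs).map (fun x => x.tail))
    else []
termination_by rows => (rows.headD []).length
decreasing_by
  simp only [List.all_cons, Bool.and_eq_true, Bool.not_eq_true', List.isEmpty_eq_false_iff] at h
  simp only [List.map_cons, List.headD_cons, List.length_tail]
  exact Nat.sub_lt (List.length_pos_iff.mpr h.1) Nat.one_pos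

def get_consensus_dna (aligned_sequences : List String) : String :=
  let consensus :=
    (pvZipStar (aligned_sequences.map String.toList)).foldl
      (fun acc col => acc ++ [pvPickA (col.foldl pvStep (0, 0, 0, 0))]) []
  String.mk consensus

-- ===== PORT B =====

-- B's run-scan loop body: extend the last run or open a new one
def pvRunStep (runs : List (Char × Int)) (ch : Char) : List (Char × Int) :=
  match runs.getLast? with
  | some r => if r.1 = ch then runs.dropLast ++ [(ch, r.2 + 1)] else runs ++ [(ch, 1)]
  | none => [(ch, 1)]

-- "longest = [r for r in runs if all(...)]; longest[0][0] if len(longest)==1 else 'N'"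
def pvLongest (runs : List (Char × Int)) : Char :=
  match runs.filter (fun r => runs.all (fun s => decide (s.2 ≤ r.2))) with
  | [r] => r.1
  | _ => 'N'

-- B's per-column decision: sort the ACGT characters, scan runs, unique longest run wins
def pvPickB (col : List Char) : Char :=
  pvLongest ((PySem.List.sorted
    (col.filter (fun ch => ch == 'A' || ch == 'C' || ch == 'G' || ch == 'T')) (fun x => x)).foldl
      pvRunStep [])

def get_consensus_dna_alt (aligned_sequences : List String) : String :=
  let out :=
    (pvZipStar (aligned_sequences.map String.toList)).foldl
      (fun acc col => acc ++ [pvPickB col]) []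
  String.mk out

-- ===== PRECONDITION & SPEC =====
def Spec_get_consensus_dna (aligned_sequences : List String) (out : String) : Prop := out = get_consensus_dna_alt aligned_sequences
instance (aligned_sequences : List String) (out : String) : Decidable (Spec_get_consensus_dna aligned_sequences out) := by unfold Spec_get_consensus_dna; infer_instance

-- ===== CLAIM (what is proved, stated in full; the proofs are below) =====
def Claim_equal_get_consensus_dna : Prop := ∀ (aligned_sequences : List String), Dom_get_consensus_dna aligned_sequences → Spec_get_consensus_dna aligned_sequences (get_consensus_dna aligned_sequences)

-- ===== LEMMAS AND PROOFS =====

-- A's fold computes the four nucleotide counts of the column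
lemma foldl_pvStep_counts (col : List Char) :
    ∀ a t c g : Int, col.foldl pvStep (a, t, c, g)
      = (a + col.count 'A', t + col.count 'T', c + col.count 'C', g + col.count 'G') := by
  induction col with
  | nil => intro a t c g; simp
  | cons x xs ih =>
    intro a t c g
    simp only [List.foldl_cons, pvStep, List.count_cons]
    by_cases h1 : x = 'A'
    · subst h1; rw [if_pos rfl, ih]; simp; omega
    · rw [if_neg h1]
      by_cases h2 : x = 'T'
      · subst h2; rw [if_pos rfl, ih]
        simp; omega
      · rw [if_neg h2]
        by_cases h3 : x = 'C'
        · subst h3; rw [if_pos rfl, ih]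
          simp [h1, h2]; omega
        · rw [if_neg h3]
          by_cases h4 : x = 'G'
          · subst h4; rw [if_pos rfl, ih]
            simp [h1, h2, h3]; omega
          · rw [if_neg h4, ih]
            simp [h1, h2, h3, h4]

-- the canonical sorted form of a column's ACGT characters
def pvCanon (col : List Char) : List Char :=
  List.replicate (col.count 'A') 'A' ++ List.replicate (col.count 'C') 'C'
    ++ List.replicate (col.count 'G') 'G' ++ List.replicate (col.count 'T') 'T'

lemma sorted_filter_eq_canon (col : List Char) :
    PySem.List.sorted
      (col.filter (fun ch => ch == 'A' || ch == 'C' || ch == 'G' || ch == 'T')) (fun x => x)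
      = pvCanon col := by
  apply PySem.List.sorted_id_eq_of_perm_of_pairwise
  · rw [List.perm_iff_count]
    intro x
    by_cases hA : x = 'A'
    · subst hA
      rw [List.count_filter (by decide)]
      simp [pvCanon, List.count_append, List.count_replicate]
    · by_cases hC : x = 'C'
      · subst hC
        rw [List.count_filter (by decide)]
        simp [pvCanon, List.count_append, List.count_replicate]
      · by_cases hG : x = 'G'
        · subst hG
          rw [List.count_filter (by decide)]
          simp [pvCanon, List.count_append, List.count_replicate]
        · by_cases hT : x = 'T'
          · subst hT
            rw [List.count_filter (by decide)]
            simp [pvCanon, List.count_append, List.count_replicate]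
          · have h0 : List.count x (List.filter
                (fun ch => ch == 'A' || ch == 'C' || ch == 'G' || ch == 'T') col) = 0 := by
              rw [List.count_eq_zero]
              intro hmem
              have := List.of_mem_filter hmem
              simp only [Bool.or_eq_true, beq_iff_eq] at this
              rcases this with h | h | h | h <;> simp_all
            rw [h0]
            simp [pvCanon, List.count_append, List.count_replicate, hA, hC, hG, hT,
              beq_iff_eq, Ne.symm]
  · unfold pvCanon
    refine List.pairwise_append.mpr ⟨List.pairwise_append.mpr
      ⟨List.pairwise_append.mpr ⟨?_, ?_, ?_⟩, ?_, ?_⟩, ?_, ?_⟩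
    · exact List.pairwise_replicate.mpr (Or.inr (le_refl _))
    · exact List.pairwise_replicate.mpr (Or.inr (le_refl _))
    · intro a ha b hb
      rw [List.eq_of_mem_replicate ha, List.eq_of_mem_replicate hb]
      decide
    · exact List.pairwise_replicate.mpr (Or.inr (le_refl _))
    · intro a ha b hb
      rw [List.eq_of_mem_replicate hb]
      rcases List.mem_append.mp ha with h | h <;> rw [List.eq_of_mem_replicate h] <;> decide
    · exact List.pairwise_replicate.mpr (Or.inr (le_refl _))
    · intro a ha b hb
      rw [List.eq_of_mem_replicate hb]
      rcases List.mem_append.mp ha with h | h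
      · rcases List.mem_append.mp h with h2 | h2 <;> rw [List.eq_of_mem_replicate h2] <;> decide
      · rw [List.eq_of_mem_replicate h]; decide

-- a run of n equal characters extends the open last run by n
lemma run_rep (n : Nat) : ∀ (acc : List (Char × Int)) (c : Char) (k : Int),
    (List.replicate n c).foldl pvRunStep (acc ++ [(c, k)]) = acc ++ [(c, k + n)] := by
  induction n with
  | zero => intro acc c k; simp
  | succ n ih =>
    intro acc c k
    rw [List.replicate_succ, List.foldl_cons]
    have hstep : pvRunStep (acc ++ [(c, k)]) c = acc ++ [(c, k + 1)] := by
      simp [pvRunStep, List.getLast?_concat, List.dropLast_concat]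
    rw [hstep, ih, show (((n + 1 : Nat)) : Int) = (n : Int) + 1 by push_cast; ring,
      show k + ((n : Int) + 1) = k + 1 + n by ring]

-- a block of n copies of a fresh character c contributes one run (c, n) (none if n = 0)
def pvOpt (n : Nat) (ch : Char) : List (Char × Int) :=
  if n = 0 then [] else [(ch, (n : Int))]

lemma run_seg (n : Nat) (c : Char) (acc : List (Char × Int)) (ys : List Char)
    (h : ∀ p ∈ acc, p.1 ≠ c) :
    (List.replicate n c ++ ys).foldl pvRunStep acc = ys.foldl pvRunStep (acc ++ pvOpt n c) := by
  cases n with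
  | zero => simp [pvOpt]
  | succ n =>
    rw [List.foldl_append, List.replicate_succ, List.foldl_cons]
    have hstep : pvRunStep acc c = acc ++ [(c, 1)] := by
      unfold pvRunStep
      cases hl : acc.getLast? with
      | none => simp [List.getLast?_eq_none_iff.mp hl]
      | some r =>
        have : r.1 ≠ c := h r (List.mem_of_getLast? hl)
        simp [this]
    rw [hstep, run_rep, pvOpt, if_neg (Nat.succ_ne_zero n),
      show (((n + 1 : Nat)) : Int) = (1 : Int) + n by push_cast; ring]

lemma mem_pvOpt {p : Char × Int} {n : Nat} {ch : Char} (h : p ∈ pvOpt n ch) : p.1 = ch := by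
  unfold pvOpt at h
  split at h <;> simp_all

-- the run scan over the canonical sorted column
lemma runs_canon (col : List Char) :
    (pvCanon col).foldl pvRunStep []
      = pvOpt (col.count 'A') 'A' ++ pvOpt (col.count 'C') 'C'
        ++ pvOpt (col.count 'G') 'G' ++ pvOpt (col.count 'T') 'T' := by
  unfold pvCanon
  rw [List.append_assoc, List.append_assoc]
  rw [run_seg _ _ _ _ (by simp)]
  rw [run_seg _ _ _ _ (by intro p hp; simp only [List.nil_append] at hp; rw [mem_pvOpt hp]; decide)]
  rw [run_seg _ _ _ _ (by
    intro p hp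
    simp only [List.nil_append, List.mem_append] at hp
    rcases hp with h | h <;> rw [mem_pvOpt h] <;> decide)]
  rw [show (List.replicate (col.count 'T') 'T' : List Char) = List.replicate (col.count 'T') 'T' ++ [] by simp]
  rw [run_seg _ _ _ _ (by
    intro p hp
    simp only [List.nil_append, List.mem_append] at hp
    rcases hp with (h | h) | h <;> rw [mem_pvOpt h] <;> decide)]
  simp [List.append_assoc]

lemma count4 (x a t c g : Int) : ([a, t, c, g].count x)
    = (if a = x then 1 else 0) + (if t = x then 1 else 0)
      + (if c = x then 1 else 0) + (if g = x then 1 else 0) := by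
  simp [List.count_cons]
  split_ifs <;> omega

-- reference decision: maximum of the four counts plus the same tie test (proof vehicle only)
def pvPickM (cnt : Int × Int × Int × Int) : Char :=
  let (a, t, c, g) := cnt
  let m := max a (max t (max c g))
  if 1 < ([a, t, c, g].count m) then 'N'
  else if a = m then 'A' else if t = m then 'T' else if c = m then 'C' else 'G'

-- A's argmax-with-first-key-tiebreak decision equals the max-based reference decision
set_option maxHeartbeats 3200000 in
lemma pickA_eq_M (x : Int × Int × Int × Int) : pvPickA x = pvPickM x := by
  obtain ⟨a, t, c, g⟩ := x
  simp only [pvPickA, pvPickM, pvGet]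
  by_cases h1 : t > a
  · simp only [if_pos h1]
    by_cases h2 : c > t
    · simp only [if_pos h2]
      by_cases h3 : g > c
      · simp only [if_pos h3, Char.reduceEq, reduceIte]
        rw [show max a (max t (max c g)) = g by omega]
        simp only [count4]
        split_ifs <;> first | rfl | omega
      · simp only [if_neg h3, Char.reduceEq, reduceIte]
        rw [show max a (max t (max c g)) = c by omega]
        simp only [count4]
        split_ifs <;> first | rfl | omega
    · simp only [if_neg h2]
      by_cases h3 : g > t
      · simp only [if_pos h3, Char.reduceEq, reduceIte]
        rw [show max a (max t (max c g)) = g by omega]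
        simp only [count4]
        split_ifs <;> first | rfl | omega
      · simp only [if_neg h3, Char.reduceEq, reduceIte]
        rw [show max a (max t (max c g)) = t by omega]
        simp only [count4]
        split_ifs <;> first | rfl | omega
  · simp only [if_neg h1]
    by_cases h2 : c > a
    · simp only [if_pos h2]
      by_cases h3 : g > c
      · simp only [if_pos h3, Char.reduceEq, reduceIte]
        rw [show max a (max t (max c g)) = g by omega]
        simp only [count4]
        split_ifs <;> first | rfl | omega
      · simp only [if_neg h3, Char.reduceEq, reduceIte]
        rw [show max a (max t (max c g)) = c by omega]
        simp only [count4]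
        split_ifs <;> first | rfl | omega
    · simp only [if_neg h2]
      by_cases h3 : g > a
      · simp only [if_pos h3, Char.reduceEq, reduceIte]
        rw [show max a (max t (max c g)) = g by omega]
        simp only [count4]
        split_ifs <;> first | rfl | omega
      · simp only [if_neg h3, Char.reduceEq, reduceIte]
        rw [show max a (max t (max c g)) = a by omega]
        simp only [count4]
        split_ifs <;> first | rfl | omega

-- the maximum of the four counts, and its defining properties
def pvMax4 (a c g t : Nat) : Int := max (max (a : Int) c) (max g t)

lemma pvMax4_spec (a c g t : Nat) :
    ((a : Int) ≤ pvMax4 a c g t ∧ (c : Int) ≤ pvMax4 a c g t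
      ∧ (g : Int) ≤ pvMax4 a c g t ∧ (t : Int) ≤ pvMax4 a c g t)
    ∧ (pvMax4 a c g t = (a : Int) ∨ pvMax4 a c g t = (c : Int)
      ∨ pvMax4 a c g t = (g : Int) ∨ pvMax4 a c g t = (t : Int)) := by
  simp only [pvMax4, max_def]
  split_ifs <;> omega

lemma pvMaxM_eq (a c g t : Nat) :
    max (a : Int) (max (t : Int) (max (c : Int) (g : Int))) = pvMax4 a c g t := by
  simp only [pvMax4, max_def]
  split_ifs <;> omega

lemma all_opt (n : Nat) (ch : Char) (p : Char × Int → Bool) :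
    (pvOpt n ch).all p = (n == 0 || p (ch, (n : Int))) := by
  unfold pvOpt; split <;> simp_all

-- the kept runs are exactly those whose length is the maximum count
lemma filter_runs (a c g t : Nat) :
    (pvOpt a 'A' ++ pvOpt c 'C' ++ pvOpt g 'G' ++ pvOpt t 'T').filter
        (fun r => (pvOpt a 'A' ++ pvOpt c 'C' ++ pvOpt g 'G' ++ pvOpt t 'T').all
          (fun s => decide (s.2 ≤ r.2)))
    = (if a ≠ 0 ∧ (a : Int) = pvMax4 a c g t then [('A', (a : Int))] else [])
      ++ (if c ≠ 0 ∧ (c : Int) = pvMax4 a c g t then [('C', (c : Int))] else [])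
      ++ (if g ≠ 0 ∧ (g : Int) = pvMax4 a c g t then [('G', (g : Int))] else [])
      ++ (if t ≠ 0 ∧ (t : Int) = pvMax4 a c g t then [('T', (t : Int))] else []) := by
  have hall : ∀ x : Int, 1 ≤ x →
      (((pvOpt a 'A' ++ pvOpt c 'C' ++ pvOpt g 'G' ++ pvOpt t 'T').all
        (fun s => decide (s.2 ≤ x)) = true) ↔ pvMax4 a c g t ≤ x) := by
    intro x hx
    simp only [List.all_append, Bool.and_eq_true, all_opt, Bool.or_eq_true, beq_iff_eq,
      decide_eq_true_eq]
    obtain ⟨⟨h1, h2, h3, h4⟩, h5⟩ := pvMax4_spec a c g t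
    omega
  have hblk : ∀ (n : Nat) (ch : Char), (n : Int) ≤ pvMax4 a c g t →
      (pvOpt n ch).filter
          (fun r => (pvOpt a 'A' ++ pvOpt c 'C' ++ pvOpt g 'G' ++ pvOpt t 'T').all
            (fun s => decide (s.2 ≤ r.2)))
        = (if n ≠ 0 ∧ (n : Int) = pvMax4 a c g t then [(ch, (n : Int))] else []) := by
    intro n ch hn
    by_cases h0 : n = 0
    · simp [pvOpt, h0]
    · rw [show pvOpt n ch = [(ch, (n : Int))] by simp [pvOpt, h0], List.filter_cons,
        List.filter_nil]
      by_cases hm : (n : Int) = pvMax4 a c g t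
      · have hp := (hall n (by omega)).mpr (le_of_eq hm.symm)
        simp only [hp, if_true, if_pos (And.intro h0 hm)]
      · have hp : ¬ ((pvOpt a 'A' ++ pvOpt c 'C' ++ pvOpt g 'G' ++ pvOpt t 'T').all
            (fun s => decide (s.2 ≤ ((n : Int)))) = true) := by
          rw [hall n (by omega)]; omega
        simp only [Bool.not_eq_true] at hp
        rw [hp]
        simp [hm]
  rw [List.filter_append, List.filter_append, List.filter_append]
  rw [hblk a 'A' (pvMax4_spec a c g t).1.1, hblk c 'C' (pvMax4_spec a c g t).1.2.1,
    hblk g 'G' (pvMax4_spec a c g t).1.2.2.1, hblk t 'T' (pvMax4_spec a c g t).1.2.2.2]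

-- B's unique-longest-run decision on the canonical runs equals the reference decision
set_option maxHeartbeats 1600000 in
lemma longest_blocks (a c g t : Nat) :
    pvLongest (pvOpt a 'A' ++ pvOpt c 'C' ++ pvOpt g 'G' ++ pvOpt t 'T')
      = pvPickM ((a : Int), (t : Int), (c : Int), (g : Int)) := by
  unfold pvLongest
  rw [filter_runs]
  simp only [pvPickM, count4, pvMaxM_eq]
  obtain ⟨⟨h1, h2, h3, h4⟩, h5⟩ := pvMax4_spec a c g t
  generalize hgen : pvMax4 a c g t = m at h1 h2 h3 h4 h5 ⊢
  by_cases hA : a ≠ 0 ∧ (a : Int) = m <;>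
    by_cases hC : c ≠ 0 ∧ (c : Int) = m <;>
      by_cases hG : g ≠ 0 ∧ (g : Int) = m <;>
        by_cases hT : t ≠ 0 ∧ (t : Int) = m <;>
  · (first | rw [if_pos hA] | rw [if_neg hA])
    (first | rw [if_pos hC] | rw [if_neg hC])
    (first | rw [if_pos hG] | rw [if_neg hG])
    (first | rw [if_pos hT] | rw [if_neg hT])
    repeat rw [List.append_nil]
    repeat rw [List.nil_append]
    split_ifs <;> first | rfl | (exfalso; omega)

-- the two per-column decisions agree
lemma pick_eq (col : List Char) :
    pvPickB col = pvPickA (col.foldl pvStep (0, 0, 0, 0)) := by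
  rw [foldl_pvStep_counts]
  simp only [zero_add]
  unfold pvPickB
  rw [sorted_filter_eq_canon, runs_canon, longest_blocks]
  exact (pickA_eq_M _).symm

lemma pvFoldl_append_eq_map (l : List (List Char)) (f : List Char → Char) :
    ∀ acc : List Char, l.foldl (fun acc col => acc ++ [f col]) acc = acc ++ l.map f := by
  induction l with
  | nil => intro acc; simp
  | cons x xs ih => intro acc; simp [ih]

-- ===== VERDICT (by name: the statement is the Claim_ definition above) =====
theorem get_consensus_dna_spec : Claim_equal_get_consensus_dna := by
  intro seqs _
  show get_consensus_dna seqs = get_consensus_dna_alt seqs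
  simp only [get_consensus_dna, get_consensus_dna_alt]
  rw [pvFoldl_append_eq_map, pvFoldl_append_eq_map]
  congr 1
  apply List.map_congr_left
  intro col _
  exact (pick_eq col).symm
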